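-- pv_equiv track=rewrite | github.com/bimbo721/facu | entrenamiento/tp 2.py | moneda_valida
-- ===== SOURCE A (Python) =====
-- def moneda_valida(codigo_orden_pago):
--     lista_monedas = ["ARS", "USD", "EUR", "GBP", "JPY"]
--     moneda = ""
--     hubo_moneda = False
--
--     for caracter in lista_monedas:
--         if caracter in codigo_orden_pago and hubo_moneda == False:
--             moneda = caracter
--             hubo_moneda = True
--         else:
--             if hubo_moneda == True and caracter in codigo_orden_pago:
--                 moneda = "Moneda incorrecta"
--                 return moneda
--     return moneda
-- ===== SOURCE B (Python) =====
-- CODES = {"ARS", "USD", "EUR", "GBP", "JPY"}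
--
-- def moneda_valida(codigo_orden_pago):
--     # Scan the string's 3-character windows once and collect the distinct
--     # currency codes seen; every code has length 3, so this finds exactly
--     # the codes occurring as substrings.
--     found = set()
--     for i in range(len(codigo_orden_pago) - 2):
--         tri = codigo_orden_pago[i:i + 3]
--         if tri in CODES:
--             found.add(tri)
--             if len(found) > 1:
--                 return "Moneda incorrecta"
--     return found.pop() if found else ""
-- ===== Notes on version B (the rewrite author's own statement) =====
-- stated objective: alternative
-- what changed: B traverses the input string's 3-character windows once, looking each window up in a set of currency codes and collecting the distinct codes found (early sentinel on the second), instead of A's loop over the currency list doing a substring search per currency with a found-flag state machine.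
import Mathlib
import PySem

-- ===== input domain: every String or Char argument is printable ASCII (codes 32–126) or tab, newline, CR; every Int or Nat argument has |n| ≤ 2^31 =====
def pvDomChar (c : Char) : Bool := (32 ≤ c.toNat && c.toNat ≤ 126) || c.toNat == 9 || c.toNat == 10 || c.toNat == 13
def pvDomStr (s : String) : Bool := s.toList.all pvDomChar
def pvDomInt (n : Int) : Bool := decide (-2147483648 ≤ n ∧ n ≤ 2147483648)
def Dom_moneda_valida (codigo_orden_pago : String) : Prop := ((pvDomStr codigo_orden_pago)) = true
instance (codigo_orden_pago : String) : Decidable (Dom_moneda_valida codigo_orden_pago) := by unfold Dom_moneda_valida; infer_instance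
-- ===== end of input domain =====

-- B scans the input's 3-character windows once, collecting the distinct currency codes found via a set lookup, instead of A's per-currency substring search with a found-flag; alternative algorithm, same results.


-- ===== PORT A =====
-- A's for-loop over the currency list, with state (moneda, hubo_moneda) and early return
def monedaLoopA (s : String) : List String → String → Bool → String
  | [], moneda, _ => moneda
  | c :: rest, moneda, hubo =>
    if PySem.Str.isIn c s && !hubo then monedaLoopA s rest c true
    else if hubo && PySem.Str.isIn c s then "Moneda incorrecta"
    else monedaLoopA s rest moneda hubo

def moneda_valida (codigo_orden_pago : String) : String :=
  monedaLoopA codigo_orden_pago ["ARS", "USD", "EUR", "GBP", "JPY"] "" false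

-- ===== PORT B =====
-- Source B's CODES set (PySem.Set of strings, represented as its distinct-element list)
def pvCodesB : List String := ["ARS", "USD", "EUR", "GBP", "JPY"]

-- Source B's window loop: each step inspects the 3-char window at the current position
-- (tri = codigo[i:i+3]) and advances one position; `found` is the set of codes seen so far.
def monedaLoopB : List Char → List String → String
  | a :: b :: c :: rest, found =>
    let tri := String.ofList [a, b, c]
    if pvCodesB.contains tri then
      let found' := if found.contains tri then found else found ++ [tri]
      if 1 < found'.length then "Moneda incorrecta"
      else monedaLoopB (b :: c :: rest) found'
    else monedaLoopB (b :: c :: rest) found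
  | _, found =>
    -- return found.pop() if found else ""
    match found with
    | [] => ""
    | x :: _ => x

def moneda_valida_alt (codigo_orden_pago : String) : String :=
  monedaLoopB codigo_orden_pago.toList []

-- ===== PRECONDITION & SPEC =====
def Spec_moneda_valida (codigo_orden_pago : String) (out : String) : Prop := out = moneda_valida_alt codigo_orden_pago
instance (codigo_orden_pago : String) (out : String) : Decidable (Spec_moneda_valida codigo_orden_pago out) := by unfold Spec_moneda_valida; infer_instance

-- ===== CLAIM (what is proved, stated in full; the proofs are below) =====
def Claim_equal_moneda_valida : Prop := ∀ (codigo_orden_pago : String), Dom_moneda_valida codigo_orden_pago → Spec_moneda_valida codigo_orden_pago (moneda_valida codigo_orden_pago)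

-- ===== LEMMAS AND PROOFS =====

-- the codes occurring in l as substrings, listed in code order
def presentIn (l : List Char) : List String :=
  pvCodesB.filter (fun m => PySem.Chars.isIn m.toList l)

-- 0 / 1 / many classification of a list of found codes
def classify : List String → String
  | [] => ""
  | [m] => m
  | _ :: _ :: _ => "Moneda incorrecta"

theorem classify_perm {l l' : List String} (h : l.Perm l') : classify l = classify l' := by
  match l, l' with
  | [], l' => rw [l'.perm_nil.mp h.symm]
  | [a], l' => rw [List.singleton_perm.mp h]
  | a :: b :: t, l' =>
    have hlen : l'.length = t.length + 2 := by simpa using h.length_eq.symm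
    match l' with
    | [] => simp at hlen
    | [x] => simp at hlen
    | x :: y :: t' => rfl

theorem contains_singleton (x m : String) : (([x] : List String).contains m) = (m == x) := by
  cases h : m == x <;> simp_all

theorem filter_filter' {α : Type} (p q : α → Bool) (L : List α) :
    (L.filter p).filter q = L.filter (fun a => p a && q a) := by
  induction L with
  | nil => rfl
  | cons x t ih => cases hp : p x <;> cases hq : q x <;> simp [hp, hq, ih]

theorem prefix_three {m : List Char} (hm : m.length = 3) {a b c : Char} {rest : List Char}
    (hp : m <+: (a :: b :: c :: rest)) : m = [a, b, c] := by
  obtain ⟨tl, htl⟩ := hp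
  rcases m with _ | ⟨x, _ | ⟨y, _ | ⟨z, m4⟩⟩⟩ <;> simp_all

theorem infix_three {m : List Char} (hm : m.length = 3) (a b c : Char) (rest : List Char) :
    m <:+: (a :: b :: c :: rest) ↔ m = [a, b, c] ∨ m <:+: (b :: c :: rest) := by
  rw [List.infix_cons_iff]
  constructor
  · rintro (hp | hi)
    · exact Or.inl (prefix_three hm hp)
    · exact Or.inr hi
  · rintro (rfl | hi)
    · exact Or.inl ⟨rest, rfl⟩
    · exact Or.inr hi

theorem isIn_short (m l : List Char) (h : l.length < m.length) : PySem.Chars.isIn m l = false := by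
  rw [PySem.Chars.isIn_eq_false_iff]
  intro hi
  exact absurd hi.length_le (by omega)

theorem presentIn_short (l : List Char) (h : l.length ≤ 2) : presentIn l = [] := by
  unfold presentIn
  rw [List.filter_eq_nil_iff]
  intro m hm
  have h3 : m.toList.length = 3 := by
    simp [pvCodesB] at hm
    rcases hm with rfl | rfl | rfl | rfl | rfl <;> decide
  simp [isIn_short m.toList l (by omega)]

theorem presentIn_cons (a b c : Char) (rest : List Char) :
    presentIn (a :: b :: c :: rest) =
      pvCodesB.filter (fun m =>
        (m == String.ofList [a, b, c]) || PySem.Chars.isIn m.toList (b :: c :: rest)) := by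
  unfold presentIn
  apply List.filter_congr
  intro m hm
  have hlen : m.toList.length = 3 := by
    simp [pvCodesB] at hm
    rcases hm with rfl | rfl | rfl | rfl | rfl <;> decide
  rw [Bool.eq_iff_iff]
  simp only [Bool.or_eq_true, beq_iff_eq, PySem.Chars.isIn_iff_infix]
  rw [infix_three hlen a b c rest]
  constructor
  · rintro (h | h)
    · left
      have := congrArg String.ofList h
      simpa using this
    · right; exact h
  · rintro (rfl | h)
    · left; simp
    · right; exact h

theorem perm_filter_or (q : String → Bool) (x : String) :
    ∀ (L : List String), L.Nodup → x ∈ L →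
      List.Perm (L.filter (fun m => (m == x) || q m))
        (x :: L.filter (fun m => q m && !(m == x))) := by
  intro L
  induction L with
  | nil => intro _ h; simp at h
  | cons y t ih =>
    intro hnd hx
    rcases List.mem_cons.mp hx with rfl | hx'
    · have hxt : x ∉ t := (List.nodup_cons.mp hnd).1
      have h1 : t.filter (fun m => (m == x) || q m) = t.filter (fun m => q m && !(m == x)) := by
        apply List.filter_congr
        intro m hm'
        have hne : m ≠ x := fun e => hxt (e ▸ hm')
        have hne' : (m == x) = false := beq_eq_false_iff_ne.mpr hne
        simp [hne']
      have hc1 : ((x == x) || q x) = true := by simp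
      have hc2 : (q x && !(x == x)) = false := by simp
      rw [List.filter_cons, List.filter_cons, hc1, hc2]
      simp [h1]
    · have hnd' := (List.nodup_cons.mp hnd).2
      have hyx : (y == x) = false := by
        have : y ≠ x := fun e => (List.nodup_cons.mp hnd).1 (e ▸ hx')
        simp [this]
      cases hq : q y
      · simp [hyx, hq]
        exact ih hnd' hx'
      · simp [hyx, hq]
        exact ((ih hnd' hx').cons y).trans (List.Perm.swap x y _)

theorem loopB_eq (l : List Char) : ∀ (found : List String),
    (found = [] ∨ ∃ x ∈ pvCodesB, found = [x]) →
    monedaLoopB l found =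
      classify (found ++ (presentIn l).filter (fun m => !found.contains m)) := by
  induction l with
  | nil =>
    intro found hInv
    have hp := presentIn_short [] (by simp)
    rcases hInv with rfl | ⟨x, hx, rfl⟩ <;> simp [monedaLoopB, hp, classify]
  | cons a t IHa =>
    cases t with
    | nil =>
      intro found hInv
      have hp := presentIn_short [a] (by simp)
      rcases hInv with rfl | ⟨x, hx, rfl⟩ <;> simp [monedaLoopB, hp, classify]
    | cons b t2 =>
      cases t2 with
      | nil =>
        intro found hInv
        have hp := presentIn_short [a, b] (by simp)
        rcases hInv with rfl | ⟨x, hx, rfl⟩ <;> simp [monedaLoopB, hp, classify]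
      | cons c rest =>
        intro found hInv
        have IH := IHa
        cases htri : pvCodesB.contains (String.ofList [a, b, c])
        · -- window is not a code: nothing changes
          have hnm : String.ofList [a, b, c] ∉ pvCodesB := by simpa using htri
          have hpp : presentIn (a :: b :: c :: rest) = presentIn (b :: c :: rest) := by
            rw [presentIn_cons]
            unfold presentIn
            apply List.filter_congr
            intro m hm
            have hne : m ≠ String.ofList [a, b, c] := fun e => hnm (e ▸ hm)
            simp [hne]
          rw [show monedaLoopB (a :: b :: c :: rest) found = monedaLoopB (b :: c :: rest) found from by
            simp [monedaLoopB, hnm]]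
          rw [IH found hInv, hpp]
        · have hmem : String.ofList [a, b, c] ∈ pvCodesB := by simpa using htri
          cases hf : found.contains (String.ofList [a, b, c])
          · -- the window's code is new
            rcases hInv with rfl | ⟨x, hx, rfl⟩
            · -- first code found: record it and continue
              rw [show monedaLoopB (a :: b :: c :: rest) [] =
                    monedaLoopB (b :: c :: rest) [String.ofList [a, b, c]] from by
                simp [monedaLoopB, hmem]]
              rw [IH [String.ofList [a, b, c]] (Or.inr ⟨_, hmem, rfl⟩)]
              have hX : (presentIn (b :: c :: rest)).filter
                    (fun m => !(([String.ofList [a, b, c]] : List String).contains m)) =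
                  pvCodesB.filter (fun m =>
                    PySem.Chars.isIn m.toList (b :: c :: rest) && !(m == String.ofList [a, b, c])) := by
                unfold presentIn
                rw [filter_filter']
                apply List.filter_congr
                intro m hm
                rw [contains_singleton]
              have hR : (presentIn (a :: b :: c :: rest)).filter
                    (fun m => !(([] : List String).contains m)) = presentIn (a :: b :: c :: rest) := by
                simp
              have hperm := perm_filter_or (fun m => PySem.Chars.isIn m.toList (b :: c :: rest))
                (String.ofList [a, b, c]) pvCodesB (by decide) hmem
              rw [hX]
              simp only [List.singleton_append, List.nil_append]
              rw [hR, presentIn_cons]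
              exact (classify_perm hperm).symm
            · -- a second, different code: early sentinel
              have hne : (String.ofList [a, b, c] == x) = false := by
                rwa [contains_singleton] at hf
              have hnex : ¬ (String.ofList [a, b, c] = x) := by
                intro e
                rw [e] at hne
                simp at hne
              rw [show monedaLoopB (a :: b :: c :: rest) [x] = "Moneda incorrecta" from by
                simp [monedaLoopB, hmem, hnex]]
              have htri_mem : String.ofList [a, b, c] ∈
                  (presentIn (a :: b :: c :: rest)).filter (fun m => !(([x] : List String).contains m)) := by
                apply List.mem_filter.mpr
                refine ⟨List.mem_filter.mpr ⟨hmem, ?_⟩, ?_⟩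
                · show PySem.Chars.isIn (String.ofList [a, b, c]).toList (a :: b :: c :: rest) = true
                  have he : (String.ofList [a, b, c]).toList = [a, b, c] := by simp
                  rw [he, PySem.Chars.isIn_iff_infix]
                  have hpre : [a, b, c] <+: (a :: b :: c :: rest) := ⟨rest, rfl⟩
                  exact hpre.isInfix
                · show (!(([x] : List String).contains (String.ofList [a, b, c]))) = true
                  rw [contains_singleton, hne]
                  rfl
              obtain ⟨y, ys, hE⟩ := List.exists_cons_of_ne_nil (List.ne_nil_of_mem htri_mem)
              rw [hE, List.singleton_append]
              rfl
          · -- the window's code was already found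
            rcases hInv with rfl | ⟨x, hx, rfl⟩
            · simp at hf
            · have hxe : x = String.ofList [a, b, c] := by
                rw [contains_singleton] at hf
                have := (beq_iff_eq).mp hf
                exact this.symm
              subst hxe
              rw [show monedaLoopB (a :: b :: c :: rest) [String.ofList [a, b, c]] =
                    monedaLoopB (b :: c :: rest) [String.ofList [a, b, c]] from by
                simp [monedaLoopB, hmem]]
              rw [IH [String.ofList [a, b, c]] (Or.inr ⟨_, hx, rfl⟩)]
              have hXl : (presentIn (a :: b :: c :: rest)).filter
                    (fun m => !(([String.ofList [a, b, c]] : List String).contains m)) =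
                  (presentIn (b :: c :: rest)).filter
                    (fun m => !(([String.ofList [a, b, c]] : List String).contains m)) := by
                rw [presentIn_cons]
                unfold presentIn
                rw [filter_filter', filter_filter']
                apply List.filter_congr
                intro m hm
                cases hqm : (m == String.ofList [a, b, c])
                · simp [contains_singleton, hqm]
                · have hme : m = String.ofList [a, b, c] := beq_iff_eq.mp hqm
                  simp [contains_singleton, hme]
              rw [hXl]

-- ===== VERDICT (by name: the statement is the Claim_ definition above) =====
theorem moneda_valida_spec : Claim_equal_moneda_valida := by
  intro s _
  unfold Spec_moneda_valida moneda_valida moneda_valida_alt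
  rw [loopB_eq s.toList [] (Or.inl rfl)]
  cases h1 : PySem.Chars.isIn ['A', 'R', 'S'] s.toList <;>
  cases h2 : PySem.Chars.isIn ['U', 'S', 'D'] s.toList <;>
  cases h3 : PySem.Chars.isIn ['E', 'U', 'R'] s.toList <;>
  cases h4 : PySem.Chars.isIn ['G', 'B', 'P'] s.toList <;>
  cases h5 : PySem.Chars.isIn ['J', 'P', 'Y'] s.toList <;>
    simp [monedaLoopA, presentIn, pvCodesB, classify, h1, h2, h3, h4, h5]
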